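-- pv_equiv track=rewrite | github.com/dudamarlena/pyc_source | pycfiles/xdis-4.5.0-py2.4/opcode_36.py | format_MAKE_FUNCTION_arg
-- ===== SOURCE A (Python) =====
-- MAKE_FUNCTION_FLAGS = tuple(('default keyword-only annotation closure').split())
--
-- def format_MAKE_FUNCTION_arg(flags):
--     pattr = ''
--     for flag in MAKE_FUNCTION_FLAGS:
--         bit = flags & 1
--         if bit:
--             if pattr:
--                 pattr += ', ' + flag
--             else:
--                 pattr = flag
--         flags >>= 1
--
--     return pattr
-- ===== SOURCE B (Python) =====
-- # Only the low 4 bits of flags matter, so the answer is a pure function of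
-- # flags % 16: look it up in a precomputed 16-entry table (no loop, no bit tests).
-- _TABLE = (
--     '',
--     'default',
--     'keyword-only',
--     'default, keyword-only',
--     'annotation',
--     'default, annotation',
--     'keyword-only, annotation',
--     'default, keyword-only, annotation',
--     'closure',
--     'default, closure',
--     'keyword-only, closure',
--     'default, keyword-only, closure',
--     'annotation, closure',
--     'default, annotation, closure',
--     'keyword-only, annotation, closure',
--     'default, keyword-only, annotation, closure',
-- )
--
-- def format_MAKE_FUNCTION_arg(flags):
--     return _TABLE[flags % 16]
-- ===== Notes on version B (the rewrite author's own statement) =====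
-- stated objective: alternative
-- what changed: B replaces A's bit-shifting accumulation loop (mutating flags, growing a string with a manual comma branch) with a single lookup into a precomputed sixteen-entry table of all possible outputs, indexed by the low four bits of flags; correct because only those bits affect the result.
import Mathlib
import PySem

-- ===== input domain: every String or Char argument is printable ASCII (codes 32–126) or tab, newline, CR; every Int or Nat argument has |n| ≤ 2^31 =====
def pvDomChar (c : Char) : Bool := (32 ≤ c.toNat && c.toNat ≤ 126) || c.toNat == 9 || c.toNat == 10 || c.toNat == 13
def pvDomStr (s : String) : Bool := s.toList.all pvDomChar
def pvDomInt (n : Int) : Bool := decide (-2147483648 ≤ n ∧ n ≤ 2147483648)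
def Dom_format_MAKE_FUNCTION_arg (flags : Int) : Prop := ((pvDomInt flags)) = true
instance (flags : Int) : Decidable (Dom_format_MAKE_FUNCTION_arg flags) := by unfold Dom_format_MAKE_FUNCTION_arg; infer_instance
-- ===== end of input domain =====

-- B replaces A's bit-shifting accumulation loop by a single lookup TABLE[flags % 16]
-- into a precomputed 16-entry table of all possible outputs (alternative: no loop, no accumulator).

-- ===== PORT A =====
-- MAKE_FUNCTION_FLAGS = ('default keyword-only annotation closure').split()
def MAKE_FUNCTION_FLAGS : List String := ["default", "keyword-only", "annotation", "closure"]

-- loop state: (pattr, flags); each step tests the low bit and shifts flags right by one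
def format_MAKE_FUNCTION_arg (flags : Int) : String :=
  (MAKE_FUNCTION_FLAGS.foldl
    (fun (st : String × Int) flag =>
      let bit := PySem.Int.band st.2 1
      let pattr := if bit ≠ 0 then (if st.1 ≠ "" then st.1 ++ ", " ++ flag else flag) else st.1
      (pattr, st.2 >>> (1:Nat)))
    ("", flags)).1

-- ===== PORT B =====
-- _TABLE: the 16 literal strings from Source B, in order
def MFA_TABLE : List String :=
  [ ""
  , "default"
  , "keyword-only"
  , "default, keyword-only"
  , "annotation"
  , "default, annotation"
  , "keyword-only, annotation"
  , "default, keyword-only, annotation"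
  , "closure"
  , "default, closure"
  , "keyword-only, closure"
  , "default, keyword-only, closure"
  , "annotation, closure"
  , "default, annotation, closure"
  , "keyword-only, annotation, closure"
  , "default, keyword-only, annotation, closure" ]

-- return _TABLE[flags % 16]   (0 ≤ flags % 16 < 16, so the index is always in range)
def format_MAKE_FUNCTION_arg_alt (flags : Int) : String :=
  MFA_TABLE.getD (PySem.Int.mod flags 16).toNat ""

-- ===== PRECONDITION & SPEC =====
def Spec_format_MAKE_FUNCTION_arg (flags : Int) (out : String) : Prop := out = format_MAKE_FUNCTION_arg_alt flags
instance (flags : Int) (out : String) : Decidable (Spec_format_MAKE_FUNCTION_arg flags out) := by unfold Spec_format_MAKE_FUNCTION_arg; infer_instance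

-- ===== CLAIM (what is proved, stated in full; the proofs are below) =====
def Claim_equal_format_MAKE_FUNCTION_arg : Prop := ∀ (flags : Int), Dom_format_MAKE_FUNCTION_arg flags → Spec_format_MAKE_FUNCTION_arg flags (format_MAKE_FUNCTION_arg flags)

-- ===== LEMMAS AND PROOFS =====

theorem pv_sr1 (x : Int) : x >>> (1:Nat) = x / 2 := by
  rw [Int.shiftRight_eq_div_pow]; norm_num

theorem pv_band1 (x : Int) : PySem.Int.band x 1 = x % 2 := by
  rw [PySem.Int.band_one]
  show x.fmod 2 = x % 2
  rw [Int.fmod_eq_emod]; simp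

theorem pv_emod2 (x : Int) : x % 2 = 0 ∨ x % 2 = 1 := by omega

-- ===== VERDICT (by name: the statement is the Claim_ definition above) =====
theorem format_MAKE_FUNCTION_arg_spec : Claim_equal_format_MAKE_FUNCTION_arg := by
  intro flags _
  unfold Spec_format_MAKE_FUNCTION_arg format_MAKE_FUNCTION_arg format_MAKE_FUNCTION_arg_alt
  have hx : flags % 16 =
      flags % 2 + 2 * (flags / 2 % 2) + 4 * (flags / 2 / 2 % 2) + 8 * (flags / 2 / 2 / 2 % 2) := by
    omega
  rcases pv_emod2 flags with h0 | h0 <;>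
  rcases pv_emod2 (flags / 2) with h1 | h1 <;>
  rcases pv_emod2 (flags / 2 / 2) with h2 | h2 <;>
  rcases pv_emod2 (flags / 2 / 2 / 2) with h3 | h3 <;>
  · rw [h0, h1, h2, h3] at hx
    simp [MAKE_FUNCTION_FLAGS, List.foldl, pv_band1, pv_sr1, h0, h1, h2, h3, hx,
          MFA_TABLE]
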